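-- pv_equiv track=rewrite | github.com/lake041/sesac-algorithm | 이상원/프로그래머스/10주차/영어 끝말잇기_lv2.py | solution
-- ===== SOURCE A (Python) =====
-- from collections import deque
-- import math
--
-- def solution(n, words):
--     answer = []
--     # 탈락하는 사람 없으면 [0,0]
--     # 첫 탈락자의 번호 n과 몇 번 순환째에 탈락하는지 m [n,m]
--     m = 1
--     q = deque(words[1:])
--     past = [words[0]]
--
--     while q:
--         word = q.popleft()
--         m +=1
--         if word not in past and word[0] == past[-1][-1]:
--             past.append(word)
--         else:
--             break
--
--     if m == len(words) and len(past) == len(words):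
--         answer = [0,0]
--     else:
--         fir = m%n
--         if fir ==0:
--             fir = n
--         answer = [fir , math.ceil(m/n)]
--     return answer
-- ===== SOURCE B (Python) =====
-- def solution(n, words):
--     # first index i>=1 where the chain rule breaks
--     mism = next((i for i in range(1, len(words))
--                  if words[i][:1] != words[i - 1][-1:]), None)
--     # first index j where words[j] already occurred earlier
--     dup = None
--     seen = set()
--     for j, w in enumerate(words):
--         if w in seen:
--             dup = j
--             break
--         seen.add(w)
--     cands = [x for x in (mism, dup) if x is not None]
--     if not cands:
--         return [0, 0]
--     p = min(cands) + 1          # 1-based failure position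
--     person = p % n or n
--     return [person, -(-p // n)]
-- ===== Notes on version B (the rewrite author's own statement) =====
-- stated objective: alternative
-- what changed: A simulates the game with a deque and a growing 'past' list, breaking out of a while loop; B runs two independent scans (first chain-rule mismatch via adjacent slices, first repetition via a seen-set), takes the minimum failing index and computes person/round by modular/ceiling arithmetic.
-- outside the precondition, e.g. on solution(0, ['ab']): A returns [0, 0], B returns [0, 0]
import Mathlib
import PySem

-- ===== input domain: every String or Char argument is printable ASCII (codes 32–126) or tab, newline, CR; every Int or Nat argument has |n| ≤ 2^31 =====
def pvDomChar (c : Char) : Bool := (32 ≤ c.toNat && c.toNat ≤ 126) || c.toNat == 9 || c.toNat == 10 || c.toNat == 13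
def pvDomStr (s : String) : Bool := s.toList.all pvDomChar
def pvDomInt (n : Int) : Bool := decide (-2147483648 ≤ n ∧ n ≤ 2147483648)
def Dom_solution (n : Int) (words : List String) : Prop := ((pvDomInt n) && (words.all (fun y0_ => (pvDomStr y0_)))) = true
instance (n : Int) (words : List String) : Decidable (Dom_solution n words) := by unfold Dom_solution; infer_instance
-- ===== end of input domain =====

-- B replaces A's deque-simulation of the game by two independent scans (first chain
-- mismatch, first repeated word) combined by min, plus closed modular/ceiling arithmetic;
-- objective: alternative decomposition (no speed claim).

-- ===== PORT A =====
-- the while loop: q is the deque, m the counter, past the list of accepted words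
def solutionLoop (q : List String) (m : Int) (past : List String) : Int × List String :=
  match q with
  | [] => (m, past)
  | word :: rest =>
    -- m += 1; if word not in past and word[0] == past[-1][-1]: append & continue else break
    if !(past.contains word)
        && (PySem.Str.pyGet? word 0 == PySem.Str.pyGet? ((PySem.List.pyGet? past (-1)).getD "") (-1)) then
      solutionLoop rest (m + 1) (past ++ [word])
    else
      (m + 1, past)

def solution (n : Int) (words : List String) : List Int :=
  match words with
  | [] => []   -- Python raises IndexError on words[0]; excluded by Pre_solution
  | w0 :: rest =>
    let r := solutionLoop rest 1 [w0]
    if r.1 = ((w0 :: rest).length : Int) ∧ r.2.length = (w0 :: rest).length then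
      [0, 0]
    else
      let fir := PySem.Int.mod r.1 n
      let fir := if fir = 0 then n else fir
      -- math.ceil(m/n) ported as -((-m)//n): exact here since |m| < 2^53
      [fir, -(PySem.Int.floordiv (-r.1) n)]

-- ===== PORT B =====
-- first i ≥ start with words[i][0] != words[i-1][-1] (prev = words[i-1])
def altMism (prev : String) (rest : List String) (i : Int) : Option Int :=
  match rest with
  | [] => none
  | w :: ws =>
    if PySem.Str.slice w none (some 1) ≠ PySem.Str.slice prev (some (-1)) none then some i
    else altMism w ws (i + 1)

-- first j with words[j] ∈ seen, maintaining the seen-set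
def altDup (ws : List String) (seen : PySem.Set String) (j : Int) : Option Int :=
  match ws with
  | [] => none
  | w :: rest =>
    if PySem.Set.contains seen w then some j
    else altDup rest (PySem.Set.add seen w) (j + 1)

-- min over the candidates that exist (Python: min([x for x in (mism, dup) if x is not None]))
def minOpt (a b : Option Int) : Option Int :=
  match a, b with
  | none, y => y
  | x, none => x
  | some x, some y => some (min x y)

def solution_alt (n : Int) (words : List String) : List Int :=
  let mism := match words with | [] => none | w :: ws => altMism w ws 1
  let dup := altDup words PySem.Set.empty 0
  match minOpt mism dup with
  | none => [0, 0]
  | some x =>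
    let p := x + 1
    let r := PySem.Int.mod p n
    let person := if r = 0 then n else r
    -- math.ceil(p/n) ported as -((-p)//n): exact here since |p| < 2^53
    [person, -(PySem.Int.floordiv (-p) n)]

-- ===== PRECONDITION & SPEC =====
-- Pre_ excludes exactly the inputs on which Python A raises: the empty list (IndexError on
-- words[0]), an empty word at the first position the game scan actually indexes into
-- (IndexError), and n = 0 (ZeroDivisionError when the chain fails; for uniformity every
-- n = 0 input is excluded, including the perfect-chain ones where A returns [0,0] — see cites).
def Pre_solution (n : Int) (words : List String) : Prop :=
  words ≠ [] ∧ n ≠ 0 ∧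
  ∀ i ∈ List.range words.length, 1 ≤ i →
    (∀ j ∈ List.range i, 1 ≤ j →
      (words.getD j "" ∉ words.take j ∧
       PySem.Str.pyGet? (words.getD j "") 0 = PySem.Str.pyGet? (words.getD (j - 1) "") (-1))) →
    words.getD i "" ∉ words.take i →
    (words.getD i "" ≠ "" ∧ words.getD (i - 1) "" ≠ "")
instance (n : Int) (words : List String) : Decidable (Pre_solution n words) := by
  unfold Pre_solution; infer_instance

def pvWitness_solution : Int × List String := (2, ["ab", "ba"])

def Spec_solution (n : Int) (words : List String) (out : List Int) : Prop := out = solution_alt n words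
instance (n : Int) (words : List String) (out : List Int) : Decidable (Spec_solution n words out) := by unfold Spec_solution; infer_instance

-- ===== CLAIM (what is proved, stated in full; the proofs are below) =====
def Claim_equal_solution : Prop := ∀ (n : Int) (words : List String), Dom_solution n words → Pre_solution n words → Spec_solution n words (solution n words)

-- ===== LEMMAS AND PROOFS =====

-- index (relative to q) of the first word failing A's acceptance test, given accepted prefix `past`
def ff (past : List String) (q : List String) : Option Nat :=
  match q with
  | [] => none
  | w :: ws =>
    if !(past.contains w)
        && (PySem.Str.pyGet? w 0 == PySem.Str.pyGet? ((PySem.List.pyGet? past (-1)).getD "") (-1)) then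
      (ff (past ++ [w]) ws).map (· + 1)
    else
      some 0

theorem ff_lt_length (past q : List String) (k : Nat) (h : ff past q = some k) : k < q.length := by
  induction q generalizing past k with
  | nil => simp [ff] at h
  | cons w ws ih =>
    rw [ff] at h
    split at h
    · cases hf : ff (past ++ [w]) ws with
      | none => rw [hf] at h; simp at h
      | some k' =>
        rw [hf] at h
        simp at h
        have := ih (past ++ [w]) k' hf
        simp [← h]
        omega
    · simp at h; simp [← h]

theorem solutionLoop_eq_ff (q : List String) (past : List String) (m : Int) :
    solutionLoop q m past =
      match ff past q with
      | none => (m + q.length, past ++ q)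
      | some k => (m + k + 1, past ++ q.take k) := by
  induction q generalizing past m with
  | nil => simp [solutionLoop, ff]
  | cons w ws ih =>
    rw [solutionLoop, ff]
    split
    · rw [ih]
      cases hf : ff (past ++ [w]) ws with
      | none =>
        simp only [hf, Option.map_none, List.length_cons, List.cons_append,
          List.append_assoc, List.singleton_append]
        refine Prod.ext ?_ (by simp)
        push_cast; ring
      | some k =>
        simp only [hf, Option.map_some, List.take_succ_cons, List.append_assoc,
          List.singleton_append]
        refine Prod.ext ?_ (by simp)
        push_cast; ring
    · simp

theorem optToList_inj (o1 o2 : Option Char) : o1.toList = o2.toList ↔ o1 = o2 := by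
  cases o1 <;> cases o2 <;> simp

theorem take_one_eq (xs : List Char) : xs.take 1 = xs[0]?.toList := by
  cases xs <;> rfl

theorem drop_last_eq (xs : List Char) : xs.drop (xs.length - 1) = xs.getLast?.toList := by
  induction xs with
  | nil => rfl
  | cons a l ih => cases l with
    | nil => rfl
    | cons b m => simpa using ih

-- B's w[:1] != prev[-1:] test agrees with A's w[0] == prev[-1] test, read through pyGet?
theorem sliceCond (w prev : String) :
    (PySem.Str.slice w none (some 1) = PySem.Str.slice prev (some (-1)) none)
      ↔ (PySem.Str.pyGet? w 0 = PySem.Str.pyGet? prev (-1)) := by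
  rw [← String.toList_inj, PySem.Str.toList_slice, PySem.Str.toList_slice]
  have h1 : PySem.Chars.slice w.toList none (some 1) = w.toList.take 1 :=
    PySem.List.slice_to _ (by norm_num)
  have h2 : PySem.Chars.slice prev.toList (some (-1)) none = prev.toList.drop (prev.toList.length - 1) :=
    PySem.List.slice_from_neg_one _
  rw [h1, h2, take_one_eq, drop_last_eq, optToList_inj]
  have g1 : PySem.Str.pyGet? w 0 = w.toList[0]? := by
    simp [PySem.Str.pyGet?, PySem.List.pyGet?_zero]
  have g2 : PySem.Str.pyGet? prev (-1) = prev.toList.getLast? := by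
    simp [PySem.Str.pyGet?, PySem.List.pyGet?_neg_one]
  rw [g1, g2]

theorem altMism_ge (q : List String) (prev : String) (i j : Int)
    (h : altMism prev q i = some j) : i ≤ j := by
  induction q generalizing prev i with
  | nil => simp [altMism] at h
  | cons w ws ih =>
    rw [altMism] at h
    split at h
    · simp at h; omega
    · have := ih w (i + 1) h; omega

theorem altDup_ge (q : List String) (seen : PySem.Set String) (i j : Int)
    (h : altDup q seen i = some j) : i ≤ j := by
  induction q generalizing seen i with
  | nil => simp [altDup] at h
  | cons w ws ih =>
    rw [altDup] at h
    split at h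
    · simp at h; omega
    · have := ih _ (i + 1) h; omega

theorem key_lemma (q : List String) (pref : List String) (i : Int) (hne : pref ≠ []) :
    minOpt (altMism ((PySem.List.pyGet? pref (-1)).getD "") q i)
           (altDup q (PySem.Set.ofList pref) i)
      = (ff pref q).map (fun k => i + k) := by
  induction q generalizing pref i with
  | nil => simp [altMism, altDup, ff, minOpt]
  | cons w ws ih =>
    rw [altMism, altDup, ff]
    have hcont : (PySem.Set.contains (PySem.Set.ofList pref) w) = pref.contains w := by
      by_cases hm : w ∈ pref
      · simp [PySem.Set.contains_iff, PySem.Set.mem_ofList, hm, List.contains_iff_mem]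
      · simp [PySem.Set.contains_iff, PySem.Set.mem_ofList, hm, List.contains_iff_mem]
    rw [hcont]
    by_cases hc : pref.contains w = true
    · -- duplicate: dup fires at i; ff = some 0
      rw [if_pos hc]
      have hF : (!pref.contains w
          && (PySem.Str.pyGet? w 0 == PySem.Str.pyGet? ((PySem.List.pyGet? pref (-1)).getD "") (-1))) = false := by
        rw [hc]; rfl
      rw [hF]
      simp only [Bool.false_eq_true, if_false]
      split
      · simp [minOpt]
      · cases hm : altMism w ws (i + 1) with
        | none => simp [minOpt]
        | some j =>
          have := altMism_ge ws w (i + 1) j hm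
          simp only [minOpt, Option.map_some]
          congr 1
          simp only [Nat.cast_zero, add_zero]
          omega
    · have hc' : pref.contains w = false := by
        cases h2 : pref.contains w
        · rfl
        · exact absurd h2 hc
      rw [if_neg hc]
      by_cases he : PySem.Str.pyGet? w 0 = PySem.Str.pyGet? ((PySem.List.pyGet? pref (-1)).getD "") (-1)
      · -- accepted: all three recurse
        rw [if_neg (not_ne_iff.mpr ((sliceCond w ((PySem.List.pyGet? pref (-1)).getD "")).mpr he))]
        have hT : (!pref.contains w
            && (PySem.Str.pyGet? w 0 == PySem.Str.pyGet? ((PySem.List.pyGet? pref (-1)).getD "") (-1))) = true := by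
          rw [hc']
          simp only [Bool.not_false, Bool.true_and, beq_iff_eq]
          exact he
        rw [hT]
        simp only [if_true]
        have hadd : PySem.Set.add (PySem.Set.ofList pref) w = PySem.Set.ofList (pref ++ [w]) := by
          simp [PySem.Set.ofList_eq_foldl, List.foldl_append]
        have hlast : ((PySem.List.pyGet? (pref ++ [w]) (-1)).getD "") = w := by
          simp [PySem.List.pyGet?_neg_one_append_singleton]
        have hIH := ih (pref ++ [w]) (i + 1) (by simp)
        rw [hlast, ← hadd] at hIH
        rw [hIH]
        cases ff (pref ++ [w]) ws with
        | none => simp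
        | some k =>
          simp
          push_cast
          omega
      · -- mismatch: mism fires at i; ff = some 0; dup recurses, result > i
        rw [if_pos (fun hsl => he ((sliceCond _ _).mp hsl))]
        have hF : (!pref.contains w
            && (PySem.Str.pyGet? w 0 == PySem.Str.pyGet? ((PySem.List.pyGet? pref (-1)).getD "") (-1))) = false := by
          rw [hc']
          simp only [Bool.not_false, Bool.true_and]
          exact beq_eq_false_iff_ne.mpr he
        rw [hF]
        simp only [Bool.false_eq_true, if_false]
        cases hd : altDup ws (PySem.Set.add (PySem.Set.ofList pref) w) (i + 1) with
        | none => simp [minOpt]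
        | some j =>
          have := altDup_ge ws _ (i + 1) j hd
          simp only [minOpt, Option.map_some]
          congr 1
          simp only [Nat.cast_zero, add_zero]
          omega

theorem solution_eval (n : Int) (w0 : String) (rest : List String) :
    solution n (w0 :: rest) =
      (let r := solutionLoop rest 1 [w0]
       if r.1 = ((w0 :: rest).length : Int) ∧ r.2.length = (w0 :: rest).length then
         [0, 0]
       else
         [if PySem.Int.mod r.1 n = 0 then n else PySem.Int.mod r.1 n,
          -(PySem.Int.floordiv (-r.1) n)]) := rfl

theorem solution_alt_eval (n : Int) (w0 : String) (rest : List String) :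
    solution_alt n (w0 :: rest) =
      (match minOpt (altMism w0 rest 1) (altDup (w0 :: rest) ([] : PySem.Set String) 0) with
       | none => [0, 0]
       | some x =>
         [if PySem.Int.mod (x + 1) n = 0 then n else PySem.Int.mod (x + 1) n,
          -(PySem.Int.floordiv (-(x + 1)) n)]) := rfl

-- ===== VERDICT (by name: the statement is the Claim_ definition above) =====
theorem solution_spec : Claim_equal_solution := by
  intro n words _hdom hpre
  unfold Spec_solution
  obtain ⟨hnil, _hwords, _hn⟩ := hpre
  match words with
  | [] => exact absurd rfl hnil
  | w0 :: rest =>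
    have hdup0 : altDup (w0 :: rest) PySem.Set.empty 0
        = altDup rest (PySem.Set.ofList [w0]) 1 := by
      simp [altDup, PySem.Set.empty, PySem.Set.contains, PySem.Set.add, PySem.Set.ofList_eq_foldl]
    have hprev : ((PySem.List.pyGet? [w0] (-1)).getD "") = w0 := by
      simp [PySem.List.pyGet?_neg_one]
    have hmin : minOpt (altMism w0 rest 1) (altDup (w0 :: rest) PySem.Set.empty 0)
        = (ff [w0] rest).map (fun k => 1 + (k : Int)) := by
      rw [hdup0, ← hprev]
      exact key_lemma rest [w0] 1 (by simp)
    show solution n (w0 :: rest) = solution_alt n (w0 :: rest)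
    rw [solution_eval, solution_alt_eval, solutionLoop_eq_ff]
    cases hf : ff [w0] rest with
    | none =>
      rw [hf] at hmin
      simp at hmin
      rw [hmin]
      have hcond : (1 + (rest.length : Int) = ((w0 :: rest).length : Int) ∧
          ([w0] ++ rest).length = (w0 :: rest).length) := by
        refine ⟨?_, by simp⟩
        push_cast [List.length_cons]
        omega
      rw [if_pos hcond]
    | some k =>
      have hk := ff_lt_length [w0] rest k hf
      rw [hf] at hmin
      simp at hmin
      rw [hmin]
      have hcond : ¬(1 + (k : Int) + 1 = ((w0 :: rest).length : Int) ∧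
          ([w0] ++ List.take k rest).length = (w0 :: rest).length) := by
        rintro ⟨-, h2⟩
        simp [List.length_take] at h2
        omega
      rw [if_neg hcond]
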